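-- pv_equiv track=rewrite | github.com/APS3to500/Algo | 프로그래머스/스택&큐/주식가격_이승훈.py | solution
-- ===== SOURCE A (Python) =====
-- from collections import deque
--
-- def solution(prices):
--     answer = []
--     prices = deque(prices)
--     while prices:
--         price = prices.popleft()
--         sec=0
--         for nex in prices:
--             if price>nex:
--                 sec+=1
--                 break
--             else:
--                 sec+=1
--         answer.append(sec)
--     return answer
-- ===== SOURCE B (Python) =====
-- def solution(prices):
--     # Monotonic stack, right-to-left scan: O(n) instead of A's O(n^2).
--     n = len(prices)
--     answer = [0] * n
--     stack = []  # (price, position-from-right), prices strictly decreasing toward the bottom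
--     for i in range(n - 1, -1, -1):
--         pos = n - 1 - i
--         while stack and stack[-1][0] >= prices[i]:
--             stack.pop()
--         answer[i] = pos if not stack else pos - stack[-1][1]
--         stack.append((prices[i], pos))
--     return answer
-- ===== Notes on version B (the rewrite author's own statement) =====
-- stated objective: faster
-- what changed: Replaced A's per-element rescan of the remaining deque with a single right-to-left monotonic-stack pass that resolves each waiting duration when a smaller price pops it.
import Mathlib
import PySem

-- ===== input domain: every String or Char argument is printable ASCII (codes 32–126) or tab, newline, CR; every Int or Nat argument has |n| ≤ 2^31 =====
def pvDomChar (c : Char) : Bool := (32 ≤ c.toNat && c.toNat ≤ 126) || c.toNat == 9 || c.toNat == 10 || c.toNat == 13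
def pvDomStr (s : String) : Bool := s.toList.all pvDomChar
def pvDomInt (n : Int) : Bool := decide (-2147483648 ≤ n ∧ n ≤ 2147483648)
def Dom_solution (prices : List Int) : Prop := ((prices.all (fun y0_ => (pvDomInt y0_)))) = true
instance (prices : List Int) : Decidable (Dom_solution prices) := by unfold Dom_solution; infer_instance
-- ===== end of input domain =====

-- B replaces A's quadratic rescan of the remaining deque with a single right-to-left
-- monotonic-stack pass (objective: faster, asymptotic O(n) vs O(n^2)).

-- ===== PORT A =====
-- inner 'for nex in prices: if price>nex: sec+=1; break else: sec+=1'
def pvScanSec (price : Int) : List Int → Int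
  | [] => 0
  | nex :: rest => if price > nex then 1 else 1 + pvScanSec price rest

-- 'while prices: price = prices.popleft(); …' = structural recursion on the list
def solution (prices : List Int) : List Int :=
  match prices with
  | [] => []
  | price :: rest => pvScanSec price rest :: solution rest

-- ===== PORT B =====
-- right-to-left pass: state = (stack of (price, pos-from-right), answers so far)
def pvGoB : List Int → List (Int × Int) × List Int
  | [] => ([], [])
  | p :: rest =>
    let (st, ans) := pvGoB rest
    let st' := st.dropWhile (fun q => p ≤ q.1)   -- pop while stack top price ≥ p
    let a : Int := match st' with
      | [] => (rest.length : Int)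
      | q :: _ => (rest.length : Int) - q.2
    ((p, (rest.length : Int)) :: st', a :: ans)

def solution_alt (prices : List Int) : List Int := (pvGoB prices).2

-- ===== PRECONDITION & SPEC =====
def Spec_solution (prices : List Int) (out : List Int) : Prop := out = solution_alt prices
instance (prices : List Int) (out : List Int) : Decidable (Spec_solution prices out) := by unfold Spec_solution; infer_instance

-- ===== CLAIM (what is proved, stated in full; the proofs are below) =====
def Claim_equal_solution : Prop := ∀ (prices : List Int), Dom_solution prices → Spec_solution prices (solution prices)

-- ===== LEMMAS AND PROOFS =====

-- reading the answer for a query price p off a stack st for a suffix of length len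
def pvRead (st : List (Int × Int)) (len : Nat) (p : Int) : Int :=
  match st.dropWhile (fun q => p ≤ q.1) with
  | [] => (len : Int)
  | q :: _ => (len : Int) - q.2

lemma dropWhile_dropWhile_le {p q : Int} (h : q ≤ p) (st : List (Int × Int)) :
    (st.dropWhile (fun x => p ≤ x.1)).dropWhile (fun x => q ≤ x.1)
      = st.dropWhile (fun x => q ≤ x.1) := by
  induction st with
  | nil => rfl
  | cons x t ih =>
    by_cases hx : p ≤ x.1
    · have hq : q ≤ x.1 := le_trans h hx
      simp [List.dropWhile, hx, hq, ih]
    · simp [List.dropWhile, hx]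

lemma pvGoB_inv (s : List Int) :
    (∀ p, pvRead (pvGoB s).1 s.length p = pvScanSec p s) ∧ (pvGoB s).2 = solution s := by
  induction s with
  | nil =>
    constructor
    · intro p; rfl
    · rfl
  | cons x rest ih =>
    obtain ⟨ihF, ihAns⟩ := ih
    constructor
    · intro p
      by_cases hpx : x < p
      · -- stack top (x, rest.length) survives the pop: answer is 1
        have hnle : ¬ p ≤ x := not_le.mpr hpx
        simp only [pvGoB, pvRead, pvScanSec, List.dropWhile, hnle, decide_false]
        simp [hpx]
      · -- p ≤ x: top is popped; reduce to the stack for rest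
        have hple : p ≤ x := not_lt.mp hpx
        have hkey := dropWhile_dropWhile_le hple (pvGoB rest).1
        have hF := ihF p
        rw [pvRead] at hF
        simp only [pvGoB, pvRead, List.dropWhile, hple, decide_true, pvScanSec, if_neg hpx]
        rw [hkey]
        cases hcase : (pvGoB rest).1.dropWhile (fun x => decide (p ≤ x.1)) with
        | nil => rw [hcase] at hF; simp only [List.length_cons]; rw [← hF]; push_cast; ring
        | cons q t => rw [hcase] at hF; simp only [List.length_cons]; rw [← hF]; push_cast; ring
    · have hF := ihF x
      rw [pvRead] at hF
      simp only [pvGoB, solution, ← ihAns, List.cons.injEq, and_true]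
      cases hcase : (pvGoB rest).1.dropWhile (fun q => decide (x ≤ q.1)) with
      | nil => rw [hcase] at hF; exact hF
      | cons q t => rw [hcase] at hF; exact hF

-- ===== VERDICT (by name: the statement is the Claim_ definition above) =====
theorem solution_spec : Claim_equal_solution := by
  intro prices _
  unfold Spec_solution solution_alt
  exact ((pvGoB_inv prices).2).symm
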